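-- pv_equiv track=rewrite | github.com/Derkune/Newspeak | newspeak.py | unescape_those_unprotected_by_braces
-- ===== SOURCE A (Python) =====
-- from typing import Tuple, List, Dict, Optional, Union, Iterator, Set, cast, Any
--
-- def unescape_those_unprotected_by_braces(input: str) -> str:
--     braces_nesting: int = 0
--     previous_char: str = ""
--
--     to_output: List[str] = []
--
--     for char in input:
--         if char == "{" and previous_char != "\\":
--             braces_nesting += 1
--         if char == "}" and previous_char != "\\":
--             braces_nesting -= 1
--
--         if char in "}{|" and previous_char == "\\" and braces_nesting == 0:
--             to_output.pop()
--
--         to_output.append(char)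
--         previous_char = char
--
--     return "".join(to_output)
-- ===== SOURCE B (Python) =====
-- def unescape_those_unprotected_by_braces(input: str) -> str:
--     # Two staged passes: first compute the nesting level after each character,
--     # then keep each character unless it is a backslash whose following char is
--     # an unprotected brace/pipe (nesting 0 there). The last char is always kept.
--     level = 0
--     prev = ""
--     nestings = []
--     for ch in input:
--         if ch == "{" and prev != "\\":
--             level += 1
--         if ch == "}" and prev != "\\":
--             level -= 1
--         nestings.append(level)
--         prev = ch
--     kept = [ch for ch, nxt, lvl in zip(input, input[1:], nestings[1:])
--             if not (ch == "\\" and nxt in "}{|" and lvl == 0)]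
--     return "".join(kept) + input[-1:]
-- ===== Notes on version B (the rewrite author's own statement) =====
-- stated objective: alternative
-- what changed: Replaces the single append-then-pop loop with two staged passes: a first pass records the nesting level after each character, a second pass filters the characters zipped with their successor and its nesting level (lookahead) instead of popping already-emitted backslashes.
import Mathlib
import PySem

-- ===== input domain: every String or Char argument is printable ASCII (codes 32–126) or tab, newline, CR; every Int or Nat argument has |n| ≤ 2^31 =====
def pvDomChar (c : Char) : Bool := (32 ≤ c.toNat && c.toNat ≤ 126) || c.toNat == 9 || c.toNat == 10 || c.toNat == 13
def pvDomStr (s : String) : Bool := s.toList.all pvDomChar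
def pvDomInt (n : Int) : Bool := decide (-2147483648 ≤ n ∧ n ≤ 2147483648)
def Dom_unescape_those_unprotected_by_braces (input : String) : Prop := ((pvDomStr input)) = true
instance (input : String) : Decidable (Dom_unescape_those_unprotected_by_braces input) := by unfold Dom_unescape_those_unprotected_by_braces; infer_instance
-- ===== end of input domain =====

-- B replaces A's append-then-pop loop by two staged passes (a nesting-level pass, then a
-- lookahead filter over the string zipped with its shifted self); same O(n) cost.

-- ===== PORT A =====
-- A's loop state: (braces_nesting, previous_char, to_output); previous_char is none before the first iteration ("").
-- 'to_output.pop()' is ported as dropLast: it is only reached with previous_char = '\', in which case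
-- to_output is provably nonempty (its last element is previous_char), so Python's pop never raises here.
def uA_loop : List Char → Int → Option Char → List Char → List Char
  | [], _, _, out => out
  | c :: rest, nesting, prev, out =>
    let n1 : Int := if c = '{' ∧ prev ≠ some '\\' then nesting + 1 else nesting
    let n2 : Int := if c = '}' ∧ prev ≠ some '\\' then n1 - 1 else n1
    let out1 := if (c = '}' ∨ c = '{' ∨ c = '|') ∧ prev = some '\\' ∧ n2 = 0 then out.dropLast else out
    uA_loop rest n2 (some c) (out1 ++ [c])

def unescape_those_unprotected_by_braces (input : String) : String :=
  String.ofList (uA_loop input.toList 0 none [])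

-- ===== PORT B =====
-- First pass of Source B: the list of nesting levels after each character.
def uB_nestings : List Char → Int → Option Char → List Int
  | [], _, _ => []
  | ch :: rest, level, prev =>
    let l1 : Int := if ch = '{' ∧ prev ≠ some '\\' then level + 1 else level
    let l2 : Int := if ch = '}' ∧ prev ≠ some '\\' then l1 - 1 else l1
    l2 :: uB_nestings rest l2 (some ch)

-- Second pass of Source B: the comprehension over zip(input, input[1:], nestings[1:]) as filter+map;
-- input[-1:] is s.drop (s.length - 1) (the final character if any, exact also for the empty string).
def unescape_those_unprotected_by_braces_alt (input : String) : String :=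
  let s := input.toList
  let ns := uB_nestings s 0 none
  let kept := ((s.zip ((s.drop 1).zip (ns.drop 1))).filter
      (fun x => ¬(x.1 = '\\' ∧ (x.2.1 = '}' ∨ x.2.1 = '{' ∨ x.2.1 = '|') ∧ x.2.2 = 0))).map (·.1)
  String.ofList (kept ++ s.drop (s.length - 1))

-- ===== PRECONDITION & SPEC =====
def Spec_unescape_those_unprotected_by_braces (input : String) (out : String) : Prop := out = unescape_those_unprotected_by_braces_alt input
instance (input : String) (out : String) : Decidable (Spec_unescape_those_unprotected_by_braces input out) := by unfold Spec_unescape_those_unprotected_by_braces; infer_instance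

-- ===== CLAIM (what is proved, stated in full; the proofs are below) =====
def Claim_equal_unescape_those_unprotected_by_braces : Prop := ∀ (input : String), Dom_unescape_those_unprotected_by_braces input → Spec_unescape_those_unprotected_by_braces input (unescape_those_unprotected_by_braces input)

-- ===== LEMMAS AND PROOFS =====

-- The common nesting update (prev is the character before ch, or none at the start).
def pvUpd (level : Int) (ch : Char) (prev : Option Char) : Int :=
  let l1 : Int := if ch = '{' ∧ prev ≠ some '\\' then level + 1 else level
  if ch = '}' ∧ prev ≠ some '\\' then l1 - 1 else l1

-- Reference lookahead recursion both ports are reduced to: goAux c rest lvl processes the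
-- string c :: rest where lvl is the nesting level after c; c is kept unless the next
-- character is an unprotected brace/pipe at nesting 0.
def pvKeep1 (c d : Char) (lvl : Int) : List Char :=
  if c = '\\' ∧ (d = '}' ∨ d = '{' ∨ d = '|') ∧ lvl = 0 then [] else [c]

def pvGoAux : Char → List Char → Int → List Char
  | c, [], _ => [c]
  | c, d :: rest, lvl =>
    let l' := pvUpd lvl d (some c)
    pvKeep1 c d l' ++ pvGoAux d rest l'

-- A's pop only ever removes the last element appended in the previous iteration, so the
-- accumulator splits off: a nonempty suffix absorbs every dropLast.
lemma uA_loop_append : ∀ (rest : List Char) (nesting : Int) (prev : Option Char)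
    (out1 out2 : List Char), out2 ≠ [] →
    uA_loop rest nesting prev (out1 ++ out2) = out1 ++ uA_loop rest nesting prev out2 := by
  intro rest
  induction rest with
  | nil => intro _ _ _ _ _; simp [uA_loop]
  | cons c rest ih =>
    intro nesting prev out1 out2 h2
    simp only [uA_loop]
    split_ifs <;>
      first
        | rw [List.dropLast_append_of_ne_nil h2, List.append_assoc, ih _ _ _ _ (by simp)]
        | rw [List.append_assoc, ih _ _ _ _ (by simp)]

-- A's loop, started right after a character c was emitted, is the lookahead recursion.
lemma uA_loop_eq_goAux : ∀ (rest : List Char) (c : Char) (lvl : Int),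
    uA_loop rest lvl (some c) [c] = pvGoAux c rest lvl := by
  intro rest
  induction rest with
  | nil => intro c lvl; simp [uA_loop, pvGoAux]
  | cons d rest ih =>
    intro c lvl
    simp only [uA_loop, pvGoAux]
    have hupd : (if d = '}' ∧ some c ≠ some '\\' then
          (if d = '{' ∧ some c ≠ some '\\' then lvl + 1 else lvl) - 1
        else if d = '{' ∧ some c ≠ some '\\' then lvl + 1 else lvl) = pvUpd lvl d (some c) := by
      simp [pvUpd]
    rw [hupd]
    by_cases h : (d = '}' ∨ d = '{' ∨ d = '|') ∧ some c = some '\\' ∧ pvUpd lvl d (some c) = 0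
    · have hk : pvKeep1 c d (pvUpd lvl d (some c)) = [] := by
        have hc : c = '\\' := by simpa using h.2.1
        have h0 := h.2.2
        rw [hc] at h0
        simp [pvKeep1, hc, h.1, h0]
      simp only [if_pos h, hk, List.nil_append, List.dropLast_singleton]
      exact ih d (pvUpd lvl d (some c))
    · have hk : pvKeep1 c d (pvUpd lvl d (some c)) = [c] := by
        simp only [pvKeep1, ite_eq_right_iff]
        intro hc; exact absurd ⟨hc.2.1, by simpa using hc.1, hc.2.2⟩ h
      rw [if_neg h, show ([c] : List Char) ++ [d] = [c] ++ [d] from rfl,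
        uA_loop_append _ _ _ [c] [d] (by simp), ih, hk]

-- B's zip/filter pass equals the lookahead recursion.
lemma uB_eq_goAux : ∀ (rest : List Char) (c : Char) (lvl : Int),
    (((c :: rest).zip (rest.zip (uB_nestings rest lvl (some c)))).filter
        (fun x => ¬(x.1 = '\\' ∧ (x.2.1 = '}' ∨ x.2.1 = '{' ∨ x.2.1 = '|') ∧ x.2.2 = 0))).map (·.1)
      ++ (c :: rest).drop ((c :: rest).length - 1) = pvGoAux c rest lvl := by
  intro rest
  induction rest with
  | nil => intro c lvl; simp [uB_nestings, pvGoAux]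
  | cons d rest ih =>
    intro c lvl
    simp only [uB_nestings]
    have hupd : (if d = '}' ∧ some c ≠ some '\\' then
          (if d = '{' ∧ some c ≠ some '\\' then lvl + 1 else lvl) - 1
        else if d = '{' ∧ some c ≠ some '\\' then lvl + 1 else lvl) = pvUpd lvl d (some c) := by
      simp [pvUpd]
    rw [hupd]
    have htail := ih d (pvUpd lvl d (some c))
    simp only [List.length_cons, Nat.add_sub_cancel, List.drop_succ_cons] at htail ⊢
    simp only [List.zip_cons_cons, List.filter_cons, pvGoAux]
    by_cases hp : c = '\\' ∧ (d = '}' ∨ d = '{' ∨ d = '|') ∧ pvUpd lvl d (some c) = 0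
    · obtain ⟨hc, hd, h0⟩ := hp
      subst hc
      rcases hd with h | h | h <;> subst h <;>
        simpa [List.filter_cons, pvKeep1, h0] using htail
    · have hk : pvKeep1 c d (pvUpd lvl d (some c)) = [c] := by
        simp only [pvKeep1]; rw [if_neg hp]
      rw [hk]
      rw [← htail]
      simp [hp]

theorem unescape_those_unprotected_by_braces_spec : Claim_equal_unescape_those_unprotected_by_braces := by
  intro input _
  show unescape_those_unprotected_by_braces input = unescape_those_unprotected_by_braces_alt input
  unfold unescape_those_unprotected_by_braces unescape_those_unprotected_by_braces_alt
  cases hs : input.toList with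
  | nil => simp [uA_loop, uB_nestings]
  | cons c rest =>
    have hupd : (if c = '}' ∧ (none : Option Char) ≠ some '\\' then
          (if c = '{' ∧ (none : Option Char) ≠ some '\\' then (0 : Int) + 1 else 0) - 1
        else if c = '{' ∧ (none : Option Char) ≠ some '\\' then (0 : Int) + 1 else 0) = pvUpd 0 c none := by
      simp [pvUpd]
    -- A's first iteration: previous_char is none, so no pop happens and c is emitted.
    have hA : uA_loop (c :: rest) 0 none [] = pvGoAux c rest (pvUpd 0 c none) := by
      simp only [uA_loop, hupd]
      rw [if_neg (by simp)]
      simpa using uA_loop_eq_goAux rest c (pvUpd 0 c none)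
    -- B's nesting list starts with pvUpd 0 c none.
    have hB : uB_nestings (c :: rest) 0 none = pvUpd 0 c none :: uB_nestings rest (pvUpd 0 c none) (some c) := by
      simp only [uB_nestings, hupd]
    simp only [hA, hB, List.drop_succ_cons, List.drop_zero]
    simpa using (congrArg String.ofList (uB_eq_goAux rest c (pvUpd 0 c none))).symm
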